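-- pv_equiv track=rewrite | github.com/buddy-compiler/buddy-mlir | tests/Python/AtenOpsCoverage/test_aten_op_batch_009.py | _num_triu_indices
-- ===== SOURCE A (Python) =====
-- def _num_triu_indices(row: int, col: int, offset: int) -> int:
--     n = 0
--     for i in range(row):
--         start = i + offset
--         if start < 0:
--             start = 0
--         if start < col:
--             n += col - start
--     return n
-- ===== SOURCE B (Python) =====
-- def _num_triu_indices(row: int, col: int, offset: int) -> int:
--     if row <= 0 or col <= 0:
--         return 0
--     # rows with i + offset < 0 contribute col each
--     k1 = min(max(-offset, 0), row)
--     # rows with 0 <= i + offset < col contribute col - i - offset (arithmetic series)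
--     a = max(0, -offset)
--     b = min(row, col - offset)
--     s = (b - a) * (2 * (col - offset) - a - b + 1) // 2 if b > a else 0
--     return k1 * col + s
-- ===== Notes on version B (the rewrite author's own statement) =====
-- stated objective: faster
-- what changed: Replaces A's per-row loop with a closed-form O(1) computation: a count of fully-clamped rows times col plus an arithmetic-series formula for the remaining rows.
import Mathlib
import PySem

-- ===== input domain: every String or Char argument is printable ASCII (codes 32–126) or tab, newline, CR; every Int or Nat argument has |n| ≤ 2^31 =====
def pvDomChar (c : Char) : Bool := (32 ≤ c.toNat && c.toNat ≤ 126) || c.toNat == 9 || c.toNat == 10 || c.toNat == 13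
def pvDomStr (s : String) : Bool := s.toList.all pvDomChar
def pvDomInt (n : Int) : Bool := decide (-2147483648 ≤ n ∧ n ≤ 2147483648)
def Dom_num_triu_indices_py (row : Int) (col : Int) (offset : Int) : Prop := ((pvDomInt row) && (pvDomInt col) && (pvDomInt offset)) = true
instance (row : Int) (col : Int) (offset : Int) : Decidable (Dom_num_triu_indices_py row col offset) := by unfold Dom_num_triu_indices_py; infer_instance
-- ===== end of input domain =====

-- B replaces A's O(row) loop by O(1) closed-form arithmetic (clamp counts + arithmetic series).

-- ===== PORT A =====
def num_triu_indices_py (row : Int) (col : Int) (offset : Int) : Int :=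
  (PySem.List.pyRange 0 row 1).foldl (fun n i =>
    let start := i + offset
    let start := if start < 0 then 0 else start
    if start < col then n + (col - start) else n) 0

-- ===== PORT B =====
def num_triu_indices_py_alt (row : Int) (col : Int) (offset : Int) : Int :=
  if row ≤ 0 ∨ col ≤ 0 then 0
  else
    let k1 := min (max (-offset) 0) row
    let a := max 0 (-offset)
    let b := min row (col - offset)
    let s := if b > a then PySem.Int.floordiv ((b - a) * (2 * (col - offset) - a - b + 1)) 2 else 0
    k1 * col + s

-- ===== PRECONDITION & SPEC =====
def Spec_num_triu_indices_py (row : Int) (col : Int) (offset : Int) (out : Int) : Prop := out = num_triu_indices_py_alt row col offset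
instance (row : Int) (col : Int) (offset : Int) (out : Int) : Decidable (Spec_num_triu_indices_py row col offset out) := by unfold Spec_num_triu_indices_py; infer_instance

-- ===== CLAIM (what is proved, stated in full; the proofs are below) =====
def Claim_equal_num_triu_indices_py : Prop := ∀ (row : Int) (col : Int) (offset : Int), Dom_num_triu_indices_py row col offset → Spec_num_triu_indices_py row col offset (num_triu_indices_py row col offset)

-- ===== LEMMAS AND PROOFS =====

-- per-row contribution of A's loop body
def pvContrib (col offset i : Int) : Int :=
  if (if i + offset < 0 then 0 else i + offset) < col
  then col - (if i + offset < 0 then 0 else i + offset) else 0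

lemma floordiv_two_shift (x t : Int) :
    PySem.Int.floordiv (x + t * 2) 2 = PySem.Int.floordiv x 2 + t := by
  rw [PySem.Int.floordiv_eq_ediv_of_pos (by norm_num), PySem.Int.floordiv_eq_ediv_of_pos (by norm_num)]
  exact Int.add_mul_ediv_right x t (by norm_num)

lemma floordiv_two_double (y : Int) : PySem.Int.floordiv (2 * y) 2 = y := by
  rw [PySem.Int.floordiv_eq_ediv_of_pos (by norm_num)]
  exact Int.mul_ediv_cancel_left y (by norm_num)

-- the series part of B, isolated
def pvSeries (a b c o : Int) : Int :=
  if b > a then PySem.Int.floordiv ((b - a) * (2 * (c - o) - a - b + 1)) 2 else 0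

lemma pvSeries_succ (a b c o : Int) (h : a ≤ b) :
    pvSeries a (b + 1) c o = pvSeries a b c o + (c - o - b) := by
  unfold pvSeries
  rw [if_pos (by omega)]
  by_cases hab : b > a
  · rw [if_pos hab]
    have hN : (b + 1 - a) * (2 * (c - o) - a - (b + 1) + 1)
        = (b - a) * (2 * (c - o) - a - b + 1) + (c - o - b) * 2 := by ring
    rw [hN, floordiv_two_shift]
  · rw [if_neg hab]
    have hab' : a = b := by omega
    subst hab'
    have hN : (a + 1 - a) * (2 * (c - o) - a - (a + 1) + 1) = 2 * (c - o - a) := by ring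
    rw [hN, floordiv_two_double]
    omega

lemma alt_step (r c o : Int) (hr : 0 ≤ r) :
    num_triu_indices_py_alt (r + 1) c o = num_triu_indices_py_alt r c o + pvContrib c o r := by
  by_cases hc : c ≤ 0
  · unfold num_triu_indices_py_alt pvContrib
    rw [if_pos (Or.inr hc), if_pos (Or.inr hc)]
    split_ifs with h1 h2 h2 <;> omega
  · push Not at hc
    unfold num_triu_indices_py_alt
    rw [if_neg (by omega)]
    show min (max (-o) 0) (r + 1) * c + pvSeries (max 0 (-o)) (min (r + 1) (c - o)) c o = _
    by_cases hr0 : r = 0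
    · subst hr0
      rw [if_pos (by omega)]
      simp only [zero_add]
      by_cases ho : o < 0
      · -- k1 = 1, series empty
        have h1 : min (max (-o) 0) 1 = 1 := by omega
        have h2 : pvSeries (max 0 (-o)) (min 1 (c - o)) c o = 0 := by
          unfold pvSeries; rw [if_neg (by omega)]
        have hf : pvContrib c o 0 = c := by
          unfold pvContrib; split_ifs <;> omega
        rw [h1, h2, hf]; ring
      · push Not at ho
        have h1 : min (max (-o) 0) 1 = 0 := by omega
        rw [h1]
        by_cases hoc : o < c
        · have hb : min 1 (c - o) = (0 : Int) + 1 := by omega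
          have ha : max 0 (-o) = (0 : Int) := by omega
          rw [hb, ha, pvSeries_succ 0 0 c o le_rfl]
          have hs : pvSeries 0 0 c o = 0 := by
            unfold pvSeries; rw [if_neg (by omega)]
          have hf : pvContrib c o 0 = c - o := by
            unfold pvContrib; split_ifs <;> omega
          rw [hs, hf]; ring
        · push Not at hoc
          have h2 : pvSeries (max 0 (-o)) (min 1 (c - o)) c o = 0 := by
            unfold pvSeries; rw [if_neg (by omega)]
          have hf : pvContrib c o 0 = 0 := by
            unfold pvContrib; split_ifs <;> omega
          rw [h2, hf]; ring
    · have hr1 : 0 < r := by omega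
      rw [if_neg (by omega)]
      show _ = min (max (-o) 0) r * c + pvSeries (max 0 (-o)) (min r (c - o)) c o + pvContrib c o r
      by_cases hI : r + o < 0
      · -- row r still in the clamped region: k1 grows by one, both series empty
        have hk : min (max (-o) 0) (r + 1) = min (max (-o) 0) r + 1 := by omega
        have hs1 : pvSeries (max 0 (-o)) (min (r + 1) (c - o)) c o = 0 := by
          unfold pvSeries; rw [if_neg (by omega)]
        have hs2 : pvSeries (max 0 (-o)) (min r (c - o)) c o = 0 := by
          unfold pvSeries; rw [if_neg (by omega)]
        have hf : pvContrib c o r = c := by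
          unfold pvContrib; split_ifs <;> omega
        rw [hk, hs1, hs2, hf]; ring
      · push Not at hI
        have hk : min (max (-o) 0) (r + 1) = min (max (-o) 0) r := by omega
        rw [hk]
        by_cases hrc : r < c - o
        · have hb' : min (r + 1) (c - o) = min r (c - o) + 1 := by omega
          have hb : min r (c - o) = r := by omega
          rw [hb', hb, pvSeries_succ (max 0 (-o)) r c o (by omega)]
          have hf : pvContrib c o r = c - (r + o) := by
            unfold pvContrib; split_ifs <;> omega
          rw [hf]; ring
        · push Not at hrc
          have hb' : min (r + 1) (c - o) = min r (c - o) := by omega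
          have hf : pvContrib c o r = 0 := by
            unfold pvContrib; split_ifs <;> omega
          rw [hb', hf]; ring

lemma a_eq_alt (n : Nat) (c o : Int) : num_triu_indices_py (n : Int) c o = num_triu_indices_py_alt (n : Int) c o := by
  induction n with
  | zero =>
    unfold num_triu_indices_py num_triu_indices_py_alt
    rw [PySem.List.pyRange_one_eq_nil (by omega), if_pos (by omega)]
    rfl
  | succ m ih =>
    unfold num_triu_indices_py
    have hcast : ((m + 1 : Nat) : Int) = (m : Int) + 1 := by push_cast; ring
    rw [hcast, PySem.List.pyRange_one_succ_right (by positivity), List.foldl_append]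
    rw [alt_step (m : Int) c o (by positivity)]
    unfold num_triu_indices_py at ih
    rw [ih]
    simp only [List.foldl_cons, List.foldl_nil, pvContrib]
    split_ifs <;> omega

-- ===== VERDICT (by name: the statement is the Claim_ definition above) =====
theorem num_triu_indices_py_spec : Claim_equal_num_triu_indices_py := by
  intro row col offset _
  unfold Spec_num_triu_indices_py
  by_cases hrow : 0 ≤ row
  · obtain ⟨n, rfl⟩ := Int.eq_ofNat_of_zero_le hrow
    exact a_eq_alt n col offset
  · unfold num_triu_indices_py num_triu_indices_py_alt
    rw [PySem.List.pyRange_one_eq_nil (by omega), if_pos (by omega)]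
    rfl
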